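-- pv_equiv track=rewrite | github.com/tr1ten/DNA | spoj/1494.parallel-courses-ii.py | minNumberOfSemesters
-- ===== SOURCE A (Python) =====
-- from typing import List
--
-- from collections import deque
--
-- def minNumberOfSemesters(n: int, relations: List[List[int]], k: int) -> int:
--     adj = [[] for i in range(n)]
--     ind = [0]*n
--     for u,v in relations:
--         adj[u-1].append(v-1)
--         ind[v-1] +=1
--     dq = deque()
--     for  i in range(n):
--         if(not ind[i]): dq.append(i)
--     res = 0
--     while(dq):
--         sz = len(dq)
--         for i in range(sz):
--             u = dq.popleft()
--             for v in adj[u]: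
--                 ind[v] -=1
--                 if(ind[v]==0): dq.append(v)
--         res += sz//2 + sz%2;
--     return res
-- ===== SOURCE B (Python) =====
-- def minNumberOfSemesters(n, relations, k):
--     succ = [[] for _ in range(n)]
--     indeg = [0] * n
--     for u, v in relations:
--         succ[u - 1].append(v - 1)
--         indeg[v - 1] += 1
--     # pass 1: plain Kahn elimination -> a topological order of the non-cycle courses
--     order = [i for i in range(n) if indeg[i] == 0]
--     head = 0
--     while head < len(order):
--         u = order[head]
--         head += 1
--         for v in succ[u]:
--             indeg[v] -= 1
--             if indeg[v] == 0:
--                 order.append(v)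
--     # pass 2: longest-path depth of each ordered course, by relaxation in topo order
--     level = [0] * n
--     for u in order:
--         for v in succ[u]:
--             if level[u] + 1 > level[v]:
--                 level[v] = level[u] + 1
--     # pass 3: histogram of depths; each depth class needs ceil(size/2) semesters
--     hist = {}
--     for u in order:
--         hist[level[u]] = hist.get(level[u], 0) + 1
--     return sum(c // 2 + c % 2 for c in hist.values())
-- ===== Notes on version B (the rewrite author's own statement) =====
-- stated objective: alternative
-- what changed: Replaces A's single layered-BFS loop (deque processed wave-by-wave, adding ceil(wave/2) inline) with three separate passes: a flat Kahn elimination producing a topological order, a longest-path level DP by edge relaxation over that order, and a dict histogram of levels summed at the end.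
import Mathlib
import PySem

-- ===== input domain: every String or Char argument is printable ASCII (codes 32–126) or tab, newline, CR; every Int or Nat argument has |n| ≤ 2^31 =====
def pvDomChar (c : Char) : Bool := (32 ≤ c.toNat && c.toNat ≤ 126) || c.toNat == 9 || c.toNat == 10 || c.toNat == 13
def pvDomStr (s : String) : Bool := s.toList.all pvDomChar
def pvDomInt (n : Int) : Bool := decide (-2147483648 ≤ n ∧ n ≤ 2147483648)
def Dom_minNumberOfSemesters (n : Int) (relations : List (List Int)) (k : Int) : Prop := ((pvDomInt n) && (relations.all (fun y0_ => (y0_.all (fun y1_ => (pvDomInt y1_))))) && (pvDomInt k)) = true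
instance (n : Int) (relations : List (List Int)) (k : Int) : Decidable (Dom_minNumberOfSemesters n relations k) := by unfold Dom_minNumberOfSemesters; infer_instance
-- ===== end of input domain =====

-- B replaces A's single layered-BFS loop by three staged passes: flat Kahn elimination
-- producing a topological order, a longest-path level DP by relaxation over that order,
-- and a dict histogram of levels summed at the end (same cost; alternative algorithm).

-- Python's `l[i] = f(l[i])` (also `l[i] += …` / `l[i].append(…)`): exact on every index
-- Python accepts (incl. negative wraparound); where Python raises IndexError the branch
-- returns `l` unchanged (those inputs are excluded by Pre_).
def pvModify {α : Type} (l : List α) (i : Int) (f : α → α) : List α :=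
  match PySem.List.pyIdx? l.length i with
  | some j =>
    match l[j]? with
    | some x => l.set j (f x)
    | none => l
  | none => l

-- ===== PORT A =====
def aBuild (n' : Nat) (relations : List (List Int)) : List (List Int) × List Int :=
  relations.foldl
    (fun st r =>
      match r with
      | [u, v] => (pvModify st.1 (u - 1) (fun row => row ++ [v - 1]), pvModify st.2 (v - 1) (· + 1))
      | _ => st)
    (List.replicate n' ([] : List Int), List.replicate n' (0 : Int))

def aVisit (st : List Int × List Int) (v : Int) : List Int × List Int :=
  let ind' := pvModify st.2 v (· - 1)
  if PySem.List.pyGetD ind' v 1 == 0 then (st.1 ++ [v], ind') else (st.1, ind')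

def aLayer (adj : List (List Int)) (st : List Int × List Int) (u : Int) : List Int × List Int :=
  (PySem.List.pyGetD adj u []).foldl aVisit st

def aLoop (adj : List (List Int)) : Nat → List Int → List Int → Int → Int
  | 0, _, _, res => res
  | fuel + 1, dq, ind, res =>
    match dq with
    | [] => res
    | _ :: _ =>
      let sz : Int := dq.length
      let st := dq.foldl (aLayer adj) ([], ind)
      aLoop adj fuel st.1 st.2 (res + (PySem.Int.floordiv sz 2 + PySem.Int.mod sz 2))

def minNumberOfSemesters (n : Int) (relations : List (List Int)) (k : Int) : Int :=
  let st := aBuild n.toNat relations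
  let dq := ((List.range n.toNat).map Int.ofNat).filter (fun i => PySem.List.pyGetD st.2 i 1 == 0)
  aLoop st.1 (n.toNat + relations.length + 1) dq st.2 0

-- ===== PORT B =====
def bBuild (n' : Nat) (relations : List (List Int)) : List (List Int) × List Int :=
  relations.foldl
    (fun st r =>
      match r with
      | [u, v] => (pvModify st.1 (u - 1) (fun row => row ++ [v - 1]), pvModify st.2 (v - 1) (· + 1))
      | _ => st)
    (List.replicate n' ([] : List Int), List.replicate n' (0 : Int))

-- the inner `indeg[v] -= 1; if indeg[v]==0: order.append(v)` of B's Kahn pass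
def bVisit (st : List Int × List Int) (v : Int) : List Int × List Int :=
  let ind' := pvModify st.2 v (· - 1)
  if PySem.List.pyGetD ind' v 1 == 0 then (st.1 ++ [v], ind') else (st.1, ind')

-- pass 1: B's `while head < len(order)` loop; state = (pending suffix, indeg, emitted prefix)
def bKahn (succ : List (List Int)) : Nat → List Int → List Int → List Int → List Int
  | 0, _, _, order => order
  | fuel + 1, q, ind, order =>
    match q with
    | [] => order
    | u :: rest =>
      let st := (PySem.List.pyGetD succ u []).foldl bVisit (rest, ind)
      bKahn succ fuel st.1 st.2 (order ++ [u])

-- pass 2: `if level[u] + 1 > level[v]: level[v] = level[u] + 1`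
def bRelaxEdge (u : Int) (L : List Int) (v : Int) : List Int :=
  if PySem.List.pyGetD L u 0 + 1 > PySem.List.pyGetD L v 0
  then pvModify L v (fun _ => PySem.List.pyGetD L u 0 + 1) else L

def bRelaxRow (succ : List (List Int)) (L : List Int) (u : Int) : List Int :=
  (PySem.List.pyGetD succ u []).foldl (bRelaxEdge u) L

-- pass 3: `hist[level[u]] = hist.get(level[u], 0) + 1`
def bHistStep (L : List Int) (d : PySem.Dict Int Int) (u : Int) : PySem.Dict Int Int :=
  d.insert (PySem.List.pyGetD L u 0) (d.getD (PySem.List.pyGetD L u 0) 0 + 1)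

def minNumberOfSemesters_alt (n : Int) (relations : List (List Int)) (k : Int) : Int :=
  let st := bBuild n.toNat relations
  let q0 := ((List.range n.toNat).map Int.ofNat).filter (fun i => PySem.List.pyGetD st.2 i 1 == 0)
  let order := bKahn st.1 (n.toNat + relations.length + 1) q0 st.2 []
  let lvl := order.foldl (bRelaxRow st.1) (List.replicate n.toNat (0 : Int))
  let hist := order.foldl (bHistStep lvl) PySem.Dict.empty
  hist.values.foldl (fun acc c => acc + (PySem.Int.floordiv c 2 + PySem.Int.mod c 2)) 0

-- ===== PRECONDITION & SPEC =====
-- Pre_ excludes exactly the inputs on which A raises: a relation row whose length is not 2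
-- (unpacking ValueError) or an endpoint outside [1-n, n] (IndexError; endpoints in [1-n, 0]
-- hit Python's negative-index wraparound and are kept INSIDE Pre_ — both ports model it).
def Pre_minNumberOfSemesters (n : Int) (relations : List (List Int)) (k : Int) : Prop :=
  ∀ r ∈ relations, r.length = 2 ∧ ∀ x ∈ r, 1 - n ≤ x ∧ x ≤ n

instance (n : Int) (relations : List (List Int)) (k : Int) : Decidable (Pre_minNumberOfSemesters n relations k) := by
  unfold Pre_minNumberOfSemesters; infer_instance

def pvWitness_minNumberOfSemesters : Int × List (List Int) × Int := (3, [[1, 2], [1, 3], [2, 3]], 2)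

def Spec_minNumberOfSemesters (n : Int) (relations : List (List Int)) (k : Int) (out : Int) : Prop := out = minNumberOfSemesters_alt n relations k
instance (n : Int) (relations : List (List Int)) (k : Int) (out : Int) : Decidable (Spec_minNumberOfSemesters n relations k out) := by unfold Spec_minNumberOfSemesters; infer_instance

-- ===== CLAIM (what is proved, stated in full; the proofs are below) =====
def Claim_equal_minNumberOfSemesters : Prop := ∀ (n : Int) (relations : List (List Int)) (k : Int), Dom_minNumberOfSemesters n relations k → Pre_minNumberOfSemesters n relations k → Spec_minNumberOfSemesters n relations k (minNumberOfSemesters n relations k)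

-- ===== LEMMAS AND PROOFS =====

-- basic index helpers
def pvInR (len : Nat) (i : Int) : Prop := -(len : Int) ≤ i ∧ i < len

def pvEff (len : Nat) (i : Int) : Nat := (if i < 0 then i + len else i).toNat

def pvPossum (l : List Int) : Nat := (l.map Int.toNat).sum

theorem pvIdx?_inr (len : Nat) (i : Int) (h : pvInR len i) :
    PySem.List.pyIdx? len i = some (pvEff len i) := by
  obtain ⟨h1, h2⟩ := h
  unfold PySem.List.pyIdx? pvEff
  rcases lt_or_ge i 0 with hneg | hpos
  · rw [if_neg (by omega), if_pos (by omega : -(len:Int) ≤ i), if_pos hneg]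
    congr 1; omega
  · rw [if_pos hpos, if_pos h2, if_neg (by omega)]

theorem pvEff_lt (len : Nat) (i : Int) (h : pvInR len i) : pvEff len i < len := by
  obtain ⟨h1, h2⟩ := h
  unfold pvEff
  split <;> omega

theorem pvModify_eq {α : Type} (l : List α) (i : Int) (f : α → α) (h : pvInR l.length i) :
    pvModify l i f = l.set (pvEff l.length i) (f (l[pvEff l.length i]'(pvEff_lt _ _ h))) := by
  unfold pvModify
  rw [pvIdx?_inr _ _ h]
  simp [List.getElem?_eq_getElem (pvEff_lt _ _ h)]

theorem pvGetD_inr {α : Type} (l : List α) (i : Int) (d : α) (h : pvInR l.length i) :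
    PySem.List.pyGetD l i d = l[pvEff l.length i]'(pvEff_lt _ _ h) := by
  unfold PySem.List.pyGetD PySem.List.pyGet?
  rw [pvIdx?_inr _ _ h]
  simp [List.getElem?_eq_getElem (pvEff_lt _ _ h)]

theorem pvModify_length {α : Type} (l : List α) (i : Int) (f : α → α) :
    (pvModify l i f).length = l.length := by
  unfold pvModify
  rcases hj : PySem.List.pyIdx? l.length i with _ | j
  · rfl
  · rcases hx : l[j]? with _ | x <;> simp [hx]

-- pyGetD / getD bridges
theorem pvGetD_eff {α : Type} (l : List α) (i : Int) (d : α) (h : pvInR l.length i) :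
    PySem.List.pyGetD l i d = l.getD (pvEff l.length i) d := by
  rw [pvGetD_inr l i d h, List.getD_eq_getElem l d (pvEff_lt _ _ h)]

theorem pvModify_getD {α : Type} (l : List α) (i : Int) (f : α → α) (d : α) (h : pvInR l.length i)
    (s : Nat) :
    (pvModify l i f).getD s d = if s = pvEff l.length i then f (l.getD s d) else l.getD s d := by
  rw [pvModify_eq l i f h]
  by_cases hs : s = pvEff l.length i
  · subst hs
    rw [if_pos rfl, List.getD_eq_getElem _ d (by simpa using pvEff_lt _ _ h),
        List.getElem_set_self, List.getD_eq_getElem l d (pvEff_lt _ _ h)]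
  · rw [if_neg hs]
    by_cases hlt : s < l.length
    · rw [List.getD_eq_getElem _ d (by simpa using hlt), List.getD_eq_getElem l d hlt,
        List.getElem_set_ne (by omega)]
    · rw [List.getD_eq_default _ d (by simpa using hlt), List.getD_eq_default _ d (by omega)]

theorem pvPossum_set (l : List Int) (j : Nat) (x : Int) (h : j < l.length) :
    pvPossum (l.set j x) + (l[j]'h).toNat = pvPossum l + x.toNat := by
  induction l generalizing j with
  | nil => simp at h
  | cons a l ih =>
    cases j with
    | zero => simp [pvPossum]; omega
    | succ j =>
      simp only [List.set_cons_succ, pvPossum, List.map_cons, List.sum_cons, List.getElem_cons_succ]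
      have := ih j (by simpa using h)
      unfold pvPossum at this
      omega

theorem pvDecr (ind : List Int) (i : Int) (h : pvInR ind.length i) :
    (pvModify ind i (· - 1)).length = ind.length ∧
    pvPossum (pvModify ind i (· - 1)) ≤ pvPossum ind ∧
    ((PySem.List.pyGetD (pvModify ind i (· - 1)) i 1 == 0) = true →
      pvPossum (pvModify ind i (· - 1)) + 1 = pvPossum ind) := by
  have hlt := pvEff_lt _ _ h
  rw [pvModify_eq _ _ _ h]
  have hset := pvPossum_set ind _ (ind[pvEff ind.length i]'hlt - 1) hlt
  refine ⟨by simp, by omega, ?_⟩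
  intro hc
  have h' : pvInR (ind.set (pvEff ind.length i) (ind[pvEff ind.length i]'hlt - 1)).length i := by
    simpa using h
  rw [pvGetD_inr _ _ _ h'] at hc
  simp only [List.length_set] at hc
  rw [List.getElem_set_self] at hc
  simp only [beq_iff_eq] at hc
  omega

theorem aVisit_fold_acc (row : List Int) : ∀ (g ind : List Int),
    row.foldl aVisit (g, ind)
      = (g ++ (row.foldl aVisit ([], ind)).1, (row.foldl aVisit ([], ind)).2) := by
  induction row with
  | nil => intro g ind; simp
  | cons v row ih =>
    intro g ind
    simp only [List.foldl_cons]
    by_cases hc : (PySem.List.pyGetD (pvModify ind v (· - 1)) v 1 == 0) = true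
    · rw [show aVisit (g, ind) v = (g ++ [v], pvModify ind v (· - 1)) from by
          simp [aVisit, hc],
        show aVisit ([], ind) v = ([v], pvModify ind v (· - 1)) from by
          simp [aVisit, hc]]
      rw [ih (g ++ [v]), ih [v]]
      simp
    · rw [show aVisit (g, ind) v = (g, pvModify ind v (· - 1)) from by
          simp [aVisit, hc],
        show aVisit ([], ind) v = ([], pvModify ind v (· - 1)) from by
          simp [aVisit, hc]]
      rw [ih g]

theorem aVisit_fold_mu (row : List Int) : ∀ (g ind : List Int),
    (∀ v ∈ row, pvInR ind.length v) →
    ((row.foldl aVisit (g, ind)).2.length = ind.length ∧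
     (row.foldl aVisit (g, ind)).1.length + pvPossum (row.foldl aVisit (g, ind)).2
       ≤ g.length + pvPossum ind) := by
  induction row with
  | nil => intro g ind _; simp
  | cons v row ih =>
    intro g ind hr
    have hv : pvInR ind.length v := hr v (List.mem_cons_self ..)
    obtain ⟨hlen, hle, heq⟩ := pvDecr ind v hv
    simp only [List.foldl_cons]
    by_cases hc : (PySem.List.pyGetD (pvModify ind v (· - 1)) v 1 == 0) = true
    · rw [show aVisit (g, ind) v = (g ++ [v], pvModify ind v (· - 1)) from by
          simp [aVisit, hc]]
      have hr' : ∀ x ∈ row, pvInR (pvModify ind v (· - 1)).length x := by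
        intro x hx; rw [hlen]; exact hr x (List.mem_cons_of_mem _ hx)
      obtain ⟨h1, h2⟩ := ih (g ++ [v]) (pvModify ind v (· - 1)) hr'
      have := heq hc
      constructor
      · rw [h1, hlen]
      · simp only [List.length_append, List.length_cons, List.length_nil] at h2 ⊢
        omega
    · rw [show aVisit (g, ind) v = (g, pvModify ind v (· - 1)) from by
          simp [aVisit, hc]]
      have hr' : ∀ x ∈ row, pvInR (pvModify ind v (· - 1)).length x := by
        intro x hx; rw [hlen]; exact hr x (List.mem_cons_of_mem _ hx)
      obtain ⟨h1, h2⟩ := ih g (pvModify ind v (· - 1)) hr'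
      exact ⟨by rw [h1, hlen], by omega⟩

theorem layer_fold_mu (succ : List (List Int)) (n' : Nat)
    (Hadj : ∀ u : Int, ∀ v ∈ PySem.List.pyGetD succ u [], pvInR n' v) (f : List Int) :
    ∀ (st : List Int × List Int), st.2.length = n' →
    ((f.foldl (aLayer succ) st).2.length = n' ∧
     (f.foldl (aLayer succ) st).1.length + pvPossum (f.foldl (aLayer succ) st).2
       ≤ st.1.length + pvPossum st.2) := by
  induction f with
  | nil => intro st h; exact ⟨h, le_refl _⟩
  | cons u f ih =>
    intro st hlen
    simp only [List.foldl_cons]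
    have hr : ∀ v ∈ PySem.List.pyGetD succ u [], pvInR st.2.length v := by
      rw [hlen]; exact Hadj u
    have hmu := aVisit_fold_mu (PySem.List.pyGetD succ u []) st.1 st.2 hr
    have hpair : (st.1, st.2) = st := rfl
    rw [hpair] at hmu
    obtain ⟨h1, h2⟩ := hmu
    have hstep : aLayer succ st u = (PySem.List.pyGetD succ u []).foldl aVisit st := rfl
    obtain ⟨h3, h4⟩ := ih (aLayer succ st u) (by rw [hstep, h1, hlen])
    rw [hstep] at h3 h4
    refine ⟨h3, ?_⟩
    rw [hstep]
    omega

-- the wave decomposition of A's loop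
def pvWaves (adj : List (List Int)) : Nat → List Int → List Int → List (List Int)
  | 0, _, _ => []
  | fuel + 1, dq, ind =>
    match dq with
    | [] => []
    | _ :: _ =>
      dq :: pvWaves adj fuel (dq.foldl (aLayer adj) ([], ind)).1 (dq.foldl (aLayer adj) ([], ind)).2

def pvF (c : Int) : Int := PySem.Int.floordiv c 2 + PySem.Int.mod c 2

theorem aLoop_waves (adj : List (List Int)) :
    ∀ (fuel : Nat) (dq ind : List Int) (res : Int),
    aLoop adj fuel dq ind res
      = res + ((pvWaves adj fuel dq ind).map (fun wv => pvF (wv.length : Int))).sum := by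
  intro fuel
  induction fuel with
  | zero => intro dq ind res; simp [aLoop, pvWaves]
  | succ fuel ih =>
    intro dq ind res
    cases dq with
    | nil => simp [aLoop, pvWaves]
    | cons u dq' =>
      simp only [aLoop, pvWaves]
      rw [ih]
      simp [pvF]
      ring

theorem bVisit_eq_aVisit : bVisit = aVisit := rfl

theorem pvKahnLayer (succ : List (List Int)) :
    ∀ (f g ind acc : List Int) (fb : Nat),
    bKahn succ (f.length + fb) (f ++ g) ind acc
      = bKahn succ fb ((f.foldl (aLayer succ) (g, ind)).1) ((f.foldl (aLayer succ) (g, ind)).2)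
          (acc ++ f) := by
  intro f
  induction f with
  | nil => intro g ind acc fb; simp
  | cons u f' ih =>
    intro g ind acc fb
    rw [show (u :: f').length + fb = (f'.length + fb) + 1 from by simp [Nat.add_right_comm]]
    show bKahn succ (f'.length + fb)
        ((PySem.List.pyGetD succ u []).foldl bVisit (f' ++ g, ind)).1
        ((PySem.List.pyGetD succ u []).foldl bVisit (f' ++ g, ind)).2
        (acc ++ [u]) = _
    rw [bVisit_eq_aVisit, aVisit_fold_acc]
    rw [show (f' ++ g) ++ (List.foldl aVisit ([], ind) (PySem.List.pyGetD succ u [])).1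
          = f' ++ (g ++ (List.foldl aVisit ([], ind) (PySem.List.pyGetD succ u [])).1) from by simp]
    rw [ih]
    have hstep : (u :: f').foldl (aLayer succ) (g, ind)
        = f'.foldl (aLayer succ)
            (g ++ (List.foldl aVisit ([], ind) (PySem.List.pyGetD succ u [])).1,
             (List.foldl aVisit ([], ind) (PySem.List.pyGetD succ u [])).2) := by
      simp only [List.foldl_cons]
      congr 1
      exact aVisit_fold_acc (PySem.List.pyGetD succ u []) g ind
    rw [← hstep]
    simp

theorem pvMaster1 (succ : List (List Int)) (n' : Nat)
    (Hadj : ∀ u : Int, ∀ v ∈ PySem.List.pyGetD succ u [], pvInR n' v) :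
    ∀ (m fa fb : Nat) (dq ind acc : List Int),
    ind.length = n' → dq.length + pvPossum ind ≤ m → m ≤ fa → m ≤ fb →
    bKahn succ fb dq ind acc = acc ++ (pvWaves succ fa dq ind).flatten := by
  intro m
  induction m using Nat.strong_induction_on with
  | _ m IH =>
    intro fa fb dq ind acc hlen hmu hfa hfb
    cases dq with
    | nil =>
      have h1 : ∀ f, bKahn succ f [] ind acc = acc := by intro f; cases f <;> rfl
      have h2 : ∀ f, pvWaves succ f [] ind = [] := by intro f; cases f <;> rfl
      rw [h1, h2]; simp
    | cons u f' =>
      cases fa with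
      | zero => simp at hmu hfa; omega
      | succ fa =>
      have hq : (u :: f').length ≤ fb := by simp at hmu ⊢; omega
      obtain ⟨fb2, hfb2⟩ : ∃ fb2, fb = (u :: f').length + fb2 := ⟨fb - (u :: f').length, by omega⟩
      have hl := pvKahnLayer succ (u :: f') [] ind acc fb2
      rw [List.append_nil] at hl
      rw [hfb2, hl]
      obtain ⟨hlen2, hmu2⟩ := layer_fold_mu succ n' Hadj (u :: f') ([], ind) hlen
      simp only [List.length_nil, Nat.zero_add] at hmu2
      have hlen1 : (u :: f').length = f'.length + 1 := rfl
      have hrec := IH (m - (u :: f').length) (by omega) fa fb2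
        ((u :: f').foldl (aLayer succ) ([], ind)).1
        ((u :: f').foldl (aLayer succ) ([], ind)).2
        (acc ++ (u :: f'))
        hlen2 (by omega) (by omega) (by omega)
      rw [hrec]
      show _ = acc ++ (pvWaves succ (fa + 1) (u :: f') ind).flatten
      simp [pvWaves]

-- ===== occurrence counting and the Kahn invariant =====

def pvOcc (n' : Nat) (succ : List (List Int)) (t s : Nat) : Nat :=
  (succ.getD t []).countP (fun v => pvEff n' v == s)

def pvRem (n' : Nat) (succ : List (List Int)) (P : List Nat) (s : Nat) : Nat :=
  ∑ t ∈ (Finset.range n').filter (fun t => t ∉ P), pvOcc n' succ t s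

theorem pvRem_cons (n' : Nat) (succ : List (List Int)) (P : List Nat) (su s : Nat)
    (hsu : su < n') (hP : su ∉ P) :
    pvRem n' succ P s = pvOcc n' succ su s + pvRem n' succ (su :: P) s := by
  unfold pvRem
  have h1 : (Finset.range n').filter (fun t => t ∉ (su :: P))
      = ((Finset.range n').filter (fun t => t ∉ P)).erase su := by
    ext t
    simp only [Finset.mem_filter, Finset.mem_range, Finset.mem_erase, List.mem_cons]
    tauto
  rw [h1]
  have hmem : su ∈ (Finset.range n').filter (fun t => t ∉ P) := by
    simp [hsu, hP]
  rw [← Finset.add_sum_erase _ _ hmem]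

-- wave-boundary invariant of the coupled (A-layer, B-relax) computation
structure pvWI (n' : Nat) (succ : List (List Int)) (P : List Nat)
    (p g ind L : List Int) (w : Int) : Prop where
  hindLen : ind.length = n'
  hLlen : L.length = n'
  hP : ∀ s ∈ P, s < n' ∧ ind.getD s 0 = 0
  hrem : ∀ s, s < n' → ind.getD s 0 = (pvRem n' succ P s : Int)
  hp : ∀ v ∈ p, pvInR n' v ∧ ind.getD (pvEff n' v) 0 = 0 ∧ L.getD (pvEff n' v) 0 = w ∧ pvEff n' v ∉ P
  hpnd : (p.map (pvEff n')).Nodup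
  hg : ∀ v ∈ g, pvInR n' v ∧ ind.getD (pvEff n' v) 0 = 0 ∧ L.getD (pvEff n' v) 0 = w + 1 ∧
        pvEff n' v ∉ P ∧ pvEff n' v ∉ p.map (pvEff n')
  hgnd : (g.map (pvEff n')).Nodup
  hfresh : ∀ s, s < n' → ind.getD s 0 ≠ 0 → L.getD s 0 ≤ w + 1

-- mid-row invariant: u's slot is already in P, r is the unvisited rest of u's row
structure pvRI (n' : Nat) (succ : List (List Int)) (P : List Nat) (r : List Int)
    (p g ind L : List Int) (w : Int) (u : Int) : Prop where
  hindLen : ind.length = n'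
  hLlen : L.length = n'
  hP : ∀ s ∈ P, s < n' ∧ ind.getD s 0 = 0
  hrem : ∀ s, s < n' →
    ind.getD s 0 = ((pvRem n' succ P s + r.countP (fun x => pvEff n' x == s) : Nat) : Int)
  hp : ∀ v ∈ p, pvInR n' v ∧ ind.getD (pvEff n' v) 0 = 0 ∧ L.getD (pvEff n' v) 0 = w ∧ pvEff n' v ∉ P
  hpnd : (p.map (pvEff n')).Nodup
  hg : ∀ v ∈ g, pvInR n' v ∧ ind.getD (pvEff n' v) 0 = 0 ∧ L.getD (pvEff n' v) 0 = w + 1 ∧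
        pvEff n' v ∉ P ∧ pvEff n' v ∉ p.map (pvEff n')
  hgnd : (g.map (pvEff n')).Nodup
  hfresh : ∀ s, s < n' → ind.getD s 0 ≠ 0 → L.getD s 0 ≤ w + 1
  hu : pvInR n' u
  hLu : L.getD (pvEff n' u) 0 = w
  hind0u : ind.getD (pvEff n' u) 0 = 0

theorem pvRelaxEdgeLen (u : Int) (L : List Int) (v : Int) :
    (bRelaxEdge u L v).length = L.length := by
  unfold bRelaxEdge; split
  · exact pvModify_length _ _ _
  · rfl

theorem pvRelaxFoldLen (u : Int) : ∀ (r L : List Int),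
    (r.foldl (bRelaxEdge u) L).length = L.length := by
  intro r
  induction r with
  | nil => intro L; rfl
  | cons v r ih => intro L; rw [List.foldl_cons, ih, pvRelaxEdgeLen]

theorem pvRelaxLen (succ : List (List Int)) :
    ∀ (os L : List Int), (os.foldl (bRelaxRow succ) L).length = L.length := by
  intro os
  induction os with
  | nil => intro L; rfl
  | cons u os ih => intro L; rw [List.foldl_cons, ih, bRelaxRow, pvRelaxFoldLen]

theorem pvRowStep (n' : Nat) (succ : List (List Int)) (u : Int) (w : Int) (P : List Nat) :
    ∀ (r p g ind L : List Int),
    pvRI n' succ P r p g ind L w u → (∀ v ∈ r, pvInR n' v) →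
    pvRI n' succ P [] p ((r.foldl aVisit (g, ind)).1) ((r.foldl aVisit (g, ind)).2)
        (r.foldl (bRelaxEdge u) L) w u
    ∧ (∀ s, s < n' → ind.getD s 0 = 0 →
        (r.foldl aVisit (g, ind)).2.getD s 0 = 0 ∧
        (r.foldl (bRelaxEdge u) L).getD s 0 = L.getD s 0) := by
  intro r
  induction r with
  | nil =>
    intro p g ind L hRI _
    exact ⟨hRI, fun s _ h0 => ⟨h0, rfl⟩⟩
  | cons v r' ih =>
    intro p g ind L hRI hr
    obtain ⟨hindLen, hLlen, hP, hrem, hp, hpnd, hg, hgnd, hfresh, hu, hLu, hind0u⟩ := hRI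
    have hv : pvInR n' v := hr v (List.mem_cons_self ..)
    have hvlen : pvInR ind.length v := by rw [hindLen]; exact hv
    have hevlt : pvEff n' v < n' := pvEff_lt n' v hv
    have hcount : (v :: r').countP (fun x => pvEff n' x == pvEff n' v)
        = r'.countP (fun x => pvEff n' x == pvEff n' v) + 1 := by
      rw [List.countP_cons]; simp
    have hpos : (1 : Int) ≤ ind.getD (pvEff n' v) 0 := by
      rw [hrem (pvEff n' v) hevlt, hcount]; push_cast; omega
    have hnzS : ∀ s : Nat, ind.getD s 0 = 0 → s ≠ pvEff n' v := by
      intro s h0 hh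
      rw [hh] at h0
      rw [h0] at hpos
      omega
    have heffi : pvEff ind.length v = pvEff n' v := by rw [hindLen]
    have heffL : pvEff L.length v = pvEff n' v := by rw [hLlen]
    have heffLu : pvEff L.length u = pvEff n' u := by rw [hLlen]
    have hind1 : ∀ s : Nat, (pvModify ind v (· - 1)).getD s 0
        = if s = pvEff n' v then ind.getD (pvEff n' v) 0 - 1 else ind.getD s 0 := by
      intro s
      rw [pvModify_getD ind v _ 0 hvlen s, heffi]
      by_cases hs : s = pvEff n' v
      · rw [if_pos hs, if_pos hs, hs]
      · rw [if_neg hs, if_neg hs]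
    have hlen1 : (pvModify ind v (· - 1)).length = n' := by rw [pvModify_length, hindLen]
    have hcond : ((PySem.List.pyGetD (pvModify ind v (· - 1)) v 1 == 0) = true)
        ↔ (pvModify ind v (· - 1)).getD (pvEff n' v) 0 = 0 := by
      rw [pvGetD_eff _ v 1 (by rw [hlen1]; exact hv)]
      have h2 : pvEff (pvModify ind v (· - 1)).length v = pvEff n' v := by rw [hlen1]
      rw [h2, List.getD_eq_getElem _ 1 (by rw [hlen1]; exact hevlt),
        ← List.getD_eq_getElem _ 0 (by rw [hlen1]; exact hevlt)]
      simp
    have hLu' : PySem.List.pyGetD L u 0 = w := by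
      rw [pvGetD_eff L u 0 (by rw [hLlen]; exact hu), heffLu]; exact hLu
    have hLv' : PySem.List.pyGetD L v 0 = L.getD (pvEff n' v) 0 := by
      rw [pvGetD_eff L v 0 (by rw [hLlen]; exact hv), heffL]
    have hL1 : ∀ s : Nat, (bRelaxEdge u L v).getD s 0
        = if s = pvEff n' v ∧ w + 1 > L.getD (pvEff n' v) 0 then w + 1 else L.getD s 0 := by
      intro s
      unfold bRelaxEdge
      rw [hLu', hLv']
      by_cases hgt : w + 1 > L.getD (pvEff n' v) 0
      · rw [if_pos hgt, pvModify_getD L v _ 0 (by rw [hLlen]; exact hv) s, heffL]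
        by_cases hs : s = pvEff n' v
        · rw [if_pos hs, if_pos ⟨hs, hgt⟩]
        · rw [if_neg hs, if_neg (fun hh => hs hh.1)]
      · rw [if_neg hgt, if_neg (fun hh => absurd hh.2 hgt)]
    have hLlen1 : (bRelaxEdge u L v).length = n' := by rw [pvRelaxEdgeLen, hLlen]
    have hLev : (bRelaxEdge u L v).getD (pvEff n' v) 0 = w + 1 := by
      rw [hL1 (pvEff n' v)]
      by_cases hgt : w + 1 > L.getD (pvEff n' v) 0
      · rw [if_pos ⟨rfl, hgt⟩]
      · have hle := hfresh (pvEff n' v) hevlt (by omega)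
        rw [if_neg (fun hh => absurd hh.2 hgt)]
        omega
    have hLkeep : ∀ s : Nat, s ≠ pvEff n' v → (bRelaxEdge u L v).getD s 0 = L.getD s 0 := by
      intro s hs
      rw [hL1 s, if_neg (fun hh => hs hh.1)]
    -- shared invariant pieces for the recursive call
    have hP1 : ∀ s ∈ P, s < n' ∧ (pvModify ind v (· - 1)).getD s 0 = 0 := by
      intro s hs
      obtain ⟨h1, h2⟩ := hP s hs
      exact ⟨h1, by rw [hind1 s, if_neg (hnzS s h2)]; exact h2⟩
    have hrem1 : ∀ s, s < n' → (pvModify ind v (· - 1)).getD s 0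
        = ((pvRem n' succ P s + r'.countP (fun x => pvEff n' x == s) : Nat) : Int) := by
      intro s hs
      rw [hind1 s]
      by_cases hsv : s = pvEff n' v
      · rw [if_pos hsv, hrem (pvEff n' v) hevlt, hcount, hsv]
        push_cast; ring
      · have hbne : (pvEff n' v == s) = false := by
          simp only [beq_eq_false_iff_ne, ne_eq]
          exact fun hh => hsv hh.symm
        have hcnt : (v :: r').countP (fun x => pvEff n' x == s)
            = r'.countP (fun x => pvEff n' x == s) := by
          rw [List.countP_cons, hbne]; simp
        rw [if_neg hsv, hrem s hs, hcnt]
    have hp1 : ∀ v' ∈ p, pvInR n' v' ∧ (pvModify ind v (· - 1)).getD (pvEff n' v') 0 = 0 ∧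
        (bRelaxEdge u L v).getD (pvEff n' v') 0 = w ∧ pvEff n' v' ∉ P := by
      intro v' hv'
      obtain ⟨h1, h2, h3, h4⟩ := hp v' hv'
      have hne := hnzS _ h2
      exact ⟨h1, by rw [hind1 _, if_neg hne]; exact h2, by rw [hLkeep _ hne]; exact h3, h4⟩
    have hfresh1 : ∀ s, s < n' → (pvModify ind v (· - 1)).getD s 0 ≠ 0 →
        (bRelaxEdge u L v).getD s 0 ≤ w + 1 := by
      intro s hs hnz
      by_cases hsv : s = pvEff n' v
      · rw [hsv, hLev]
      · rw [hLkeep s hsv]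
        refine hfresh s hs ?_
        intro h0
        rw [hind1 s, if_neg hsv] at hnz
        exact hnz h0
    have hLu1 : (bRelaxEdge u L v).getD (pvEff n' u) 0 = w := by
      rw [hLkeep _ (hnzS _ hind0u)]; exact hLu
    have hind0u1 : (pvModify ind v (· - 1)).getD (pvEff n' u) 0 = 0 := by
      rw [hind1 _, if_neg (hnzS _ hind0u)]; exact hind0u
    have hpres1 : ∀ s, s < n' → ind.getD s 0 = 0 →
        (pvModify ind v (· - 1)).getD s 0 = 0 ∧ (bRelaxEdge u L v).getD s 0 = L.getD s 0 := by
      intro s _ h0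
      exact ⟨by rw [hind1 s, if_neg (hnzS s h0)]; exact h0, hLkeep s (hnzS s h0)⟩
    simp only [List.foldl_cons]
    by_cases hbr : (PySem.List.pyGetD (pvModify ind v (· - 1)) v 1 == 0) = true
    · have hbz := hcond.mp hbr
      have hstep : aVisit (g, ind) v = (g ++ [v], pvModify ind v (· - 1)) := by
        simp [aVisit, hbr]
      rw [hstep]
      have hg1 : ∀ x ∈ g ++ [v], pvInR n' x ∧ (pvModify ind v (· - 1)).getD (pvEff n' x) 0 = 0 ∧
          (bRelaxEdge u L v).getD (pvEff n' x) 0 = w + 1 ∧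
          pvEff n' x ∉ P ∧ pvEff n' x ∉ p.map (pvEff n') := by
        intro x hx
        rcases List.mem_append.mp hx with hx | hx
        · obtain ⟨h1, h2, h3, h4, h5⟩ := hg x hx
          have hne := hnzS _ h2
          exact ⟨h1, by rw [hind1 _, if_neg hne]; exact h2, by rw [hLkeep _ hne]; exact h3, h4, h5⟩
        · rw [List.mem_singleton.mp hx]
          refine ⟨hv, hbz, hLev, ?_, ?_⟩
          · intro hmem
            have := (hP _ hmem).2
            omega
          · intro hmem
            obtain ⟨v', hv', heq⟩ := List.mem_map.mp hmem
            have := (hp v' hv').2.1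
            rw [heq] at this
            omega
      have hgnd1 : ((g ++ [v]).map (pvEff n')).Nodup := by
        rw [List.map_append]
        simp only [List.map_cons, List.map_nil]
        rw [List.nodup_append]
        refine ⟨hgnd, List.nodup_singleton _, ?_⟩
        intro a ha b hb
        rw [List.mem_singleton.mp hb]
        obtain ⟨x, hx, heq⟩ := List.mem_map.mp ha
        have := (hg x hx).2.1
        intro hh
        rw [heq, hh] at this
        omega
      have hRI1 : pvRI n' succ P r' p (g ++ [v]) (pvModify ind v (· - 1)) (bRelaxEdge u L v) w u :=
        ⟨hlen1, hLlen1, hP1, hrem1, hp1, hpnd, hg1, hgnd1, hfresh1, hu, hLu1, hind0u1⟩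
      obtain ⟨hfin, hpres2⟩ := ih p (g ++ [v]) (pvModify ind v (· - 1)) (bRelaxEdge u L v) hRI1
        (fun x hx => hr x (List.mem_cons_of_mem _ hx))
      refine ⟨hfin, ?_⟩
      intro s hs h0
      obtain ⟨ha, hb⟩ := hpres1 s hs h0
      obtain ⟨hc, hd⟩ := hpres2 s hs ha
      exact ⟨hc, by rw [hd, hb]⟩
    · have hstep : aVisit (g, ind) v = (g, pvModify ind v (· - 1)) := by
        simp [aVisit, hbr]
      rw [hstep]
      have hbz : (pvModify ind v (· - 1)).getD (pvEff n' v) 0 ≠ 0 := fun hh => hbr (hcond.mpr hh)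
      have hg1 : ∀ x ∈ g, pvInR n' x ∧ (pvModify ind v (· - 1)).getD (pvEff n' x) 0 = 0 ∧
          (bRelaxEdge u L v).getD (pvEff n' x) 0 = w + 1 ∧
          pvEff n' x ∉ P ∧ pvEff n' x ∉ p.map (pvEff n') := by
        intro x hx
        obtain ⟨h1, h2, h3, h4, h5⟩ := hg x hx
        have hne := hnzS _ h2
        exact ⟨h1, by rw [hind1 _, if_neg hne]; exact h2, by rw [hLkeep _ hne]; exact h3, h4, h5⟩
      have hRI1 : pvRI n' succ P r' p g (pvModify ind v (· - 1)) (bRelaxEdge u L v) w u :=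
        ⟨hlen1, hLlen1, hP1, hrem1, hp1, hpnd, hg1, hgnd, hfresh1, hu, hLu1, hind0u1⟩
      obtain ⟨hfin, hpres2⟩ := ih p g (pvModify ind v (· - 1)) (bRelaxEdge u L v) hRI1
        (fun x hx => hr x (List.mem_cons_of_mem _ hx))
      refine ⟨hfin, ?_⟩
      intro s hs h0
      obtain ⟨ha, hb⟩ := hpres1 s hs h0
      obtain ⟨hc, hd⟩ := hpres2 s hs ha
      exact ⟨hc, by rw [hd, hb]⟩

theorem pvWaveStep (n' : Nat) (succ : List (List Int)) (hslen : succ.length = n')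
    (hrows : ∀ row ∈ succ, ∀ v ∈ row, pvInR n' v) :
    ∀ (p : List Int) (P : List Nat) (g ind L : List Int) (w : Int),
    pvWI n' succ P p g ind L w →
    (∃ P', pvWI n' succ P' ((p.foldl (aLayer succ) (g, ind)).1) []
        ((p.foldl (aLayer succ) (g, ind)).2) (p.foldl (bRelaxRow succ) L) (w + 1))
    ∧ (∀ s, s < n' → ind.getD s 0 = 0 →
        (p.foldl (aLayer succ) (g, ind)).2.getD s 0 = 0 ∧
        (p.foldl (bRelaxRow succ) L).getD s 0 = L.getD s 0) := by
  intro p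
  induction p with
  | nil =>
    intro P g ind L w hWI
    obtain ⟨h1, h2, hP, hrem, hp, hpnd, hg, hgnd, hfresh⟩ := hWI
    refine ⟨⟨P, ?_⟩, fun s _ h0 => ⟨h0, rfl⟩⟩
    exact ⟨h1, h2, hP, hrem,
      fun v hv => ⟨(hg v hv).1, (hg v hv).2.1, (hg v hv).2.2.1, (hg v hv).2.2.2.1⟩,
      hgnd, fun v hv => absurd hv (List.not_mem_nil),
      List.nodup_nil, fun s hs hnz => le_trans (hfresh s hs hnz) (by omega)⟩
  | cons u p' ih =>
    intro P g ind L w hWI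
    obtain ⟨hindLen, hLlen, hP, hrem, hp, hpnd, hg, hgnd, hfresh⟩ := hWI
    obtain ⟨hu, hiu0, hLuw, huP⟩ := hp u (List.mem_cons_self ..)
    have hsu_lt : pvEff n' u < n' := pvEff_lt n' u hu
    have hrow_eq : PySem.List.pyGetD succ u [] = succ.getD (pvEff n' u) [] := by
      rw [pvGetD_eff succ u [] (by rw [hslen]; exact hu)]
      congr 1
      rw [hslen]
    have hr : ∀ v ∈ PySem.List.pyGetD succ u [], pvInR n' v := by
      rw [hrow_eq, List.getD_eq_getElem succ [] (by rw [hslen]; exact hsu_lt)]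
      exact hrows _ (List.getElem_mem _)
    have hremP1 : ∀ s, s < n' → ind.getD s 0
        = ((pvRem n' succ (pvEff n' u :: P) s
            + (PySem.List.pyGetD succ u []).countP (fun x => pvEff n' x == s) : Nat) : Int) := by
      intro s hs
      rw [hrem s hs, pvRem_cons n' succ P (pvEff n' u) s hsu_lt huP, hrow_eq]
      unfold pvOcc
      push_cast
      ring
    have hsu_notp' : pvEff n' u ∉ p'.map (pvEff n') := by
      have := hpnd
      simp only [List.map_cons, List.nodup_cons] at this
      exact this.1
    have hp1 : ∀ v ∈ p', pvInR n' v ∧ ind.getD (pvEff n' v) 0 = 0 ∧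
        L.getD (pvEff n' v) 0 = w ∧ pvEff n' v ∉ (pvEff n' u :: P) := by
      intro v hv
      obtain ⟨a, b, c, d⟩ := hp v (List.mem_cons_of_mem _ hv)
      refine ⟨a, b, c, ?_⟩
      intro hmem
      rcases List.mem_cons.mp hmem with hh | hh
      · exact hsu_notp' (hh ▸ List.mem_map_of_mem hv)
      · exact d hh
    have hpnd1 : (p'.map (pvEff n')).Nodup := by
      have := hpnd
      simp only [List.map_cons, List.nodup_cons] at this
      exact this.2
    have hg1 : ∀ v ∈ g, pvInR n' v ∧ ind.getD (pvEff n' v) 0 = 0 ∧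
        L.getD (pvEff n' v) 0 = w + 1 ∧ pvEff n' v ∉ (pvEff n' u :: P) ∧
        pvEff n' v ∉ p'.map (pvEff n') := by
      intro v hv
      obtain ⟨a, b, c, d, e⟩ := hg v hv
      simp only [List.map_cons] at e
      refine ⟨a, b, c, ?_, fun hm => e (List.mem_cons_of_mem _ hm)⟩
      intro hmem
      rcases List.mem_cons.mp hmem with hh | hh
      · exact e (hh ▸ List.mem_cons_self ..)
      · exact d hh
    have hP1 : ∀ s ∈ (pvEff n' u :: P), s < n' ∧ ind.getD s 0 = 0 := by
      intro s hs
      rcases List.mem_cons.mp hs with hh | hh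
      · rw [hh]; exact ⟨hsu_lt, hiu0⟩
      · exact hP s hh
    have hRI : pvRI n' succ (pvEff n' u :: P) (PySem.List.pyGetD succ u []) p' g ind L w u :=
      ⟨hindLen, hLlen, hP1, hremP1, hp1, hpnd1, hg1, hgnd, hfresh, hu, hLuw, hiu0⟩
    obtain ⟨hRIend, hpres1⟩ := pvRowStep n' succ u w (pvEff n' u :: P)
      (PySem.List.pyGetD succ u []) p' g ind L hRI hr
    obtain ⟨e1, e2, eP, erem, ep, epnd, eg, egnd, efresh, _, _, _⟩ := hRIend
    have hWI1 : pvWI n' succ (pvEff n' u :: P) p'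
        ((PySem.List.pyGetD succ u []).foldl aVisit (g, ind)).1
        ((PySem.List.pyGetD succ u []).foldl aVisit (g, ind)).2
        ((PySem.List.pyGetD succ u []).foldl (bRelaxEdge u) L) w := by
      refine ⟨e1, e2, eP, ?_, ep, epnd, eg, egnd, efresh⟩
      intro s hs
      have := erem s hs
      simpa using this
    obtain ⟨⟨P', hWIfin⟩, hpres2⟩ := ih (pvEff n' u :: P)
      ((PySem.List.pyGetD succ u []).foldl aVisit (g, ind)).1
      ((PySem.List.pyGetD succ u []).foldl aVisit (g, ind)).2
      ((PySem.List.pyGetD succ u []).foldl (bRelaxEdge u) L) w hWI1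
    have hfold1 : (u :: p').foldl (aLayer succ) (g, ind)
        = p'.foldl (aLayer succ) ((PySem.List.pyGetD succ u []).foldl aVisit (g, ind)) := rfl
    have hfold2 : (u :: p').foldl (bRelaxRow succ) L
        = p'.foldl (bRelaxRow succ) ((PySem.List.pyGetD succ u []).foldl (bRelaxEdge u) L) := rfl
    refine ⟨⟨P', ?_⟩, ?_⟩
    · rw [hfold1, hfold2]
      exact hWIfin
    · intro s hs h0
      obtain ⟨ha, hb⟩ := hpres1 s hs h0
      obtain ⟨hc, hd⟩ := hpres2 s hs ha
      rw [hfold1, hfold2]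
      exact ⟨hc, by rw [hd, hb]⟩

theorem pvMaster2 (n' : Nat) (succ : List (List Int)) (hslen : succ.length = n')
    (hrows : ∀ row ∈ succ, ∀ v ∈ row, pvInR n' v) :
    ∀ (fa : Nat) (P : List Nat) (dq ind L : List Int) (w : Int),
    pvWI n' succ P dq [] ind L w →
    (∀ s, s < n' → ind.getD s 0 = 0 →
      ((pvWaves succ fa dq ind).flatten.foldl (bRelaxRow succ) L).getD s 0 = L.getD s 0)
    ∧ (∀ j (hj : j < (pvWaves succ fa dq ind).length), ∀ u ∈ (pvWaves succ fa dq ind)[j],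
        pvInR n' u ∧
        ((pvWaves succ fa dq ind).flatten.foldl (bRelaxRow succ) L).getD (pvEff n' u) 0 = w + j) := by
  intro fa
  induction fa with
  | zero =>
    intro P dq ind L w hWI
    refine ⟨fun s _ _ => rfl, fun j hj => ?_⟩
    simp [pvWaves] at hj
  | succ fa ihf =>
    intro P dq ind L w hWI
    cases dq with
    | nil =>
      refine ⟨fun s _ _ => rfl, fun j hj => ?_⟩
      simp [pvWaves] at hj
    | cons u dq' =>
      have hwv : pvWaves succ (fa + 1) (u :: dq') ind
          = (u :: dq') :: pvWaves succ fa
              ((u :: dq').foldl (aLayer succ) ([], ind)).1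
              ((u :: dq').foldl (aLayer succ) ([], ind)).2 := rfl
      obtain ⟨⟨P', hWI'⟩, hpres1⟩ := pvWaveStep n' succ hslen hrows (u :: dq') P [] ind L w hWI
      obtain ⟨hpres2, hlev⟩ := ihf P'
        ((u :: dq').foldl (aLayer succ) ([], ind)).1
        ((u :: dq').foldl (aLayer succ) ([], ind)).2
        ((u :: dq').foldl (bRelaxRow succ) L) (w + 1) hWI'
      have hfold : (pvWaves succ (fa + 1) (u :: dq') ind).flatten.foldl (bRelaxRow succ) L
          = (pvWaves succ fa ((u :: dq').foldl (aLayer succ) ([], ind)).1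
              ((u :: dq').foldl (aLayer succ) ([], ind)).2).flatten.foldl (bRelaxRow succ)
              ((u :: dq').foldl (bRelaxRow succ) L) := by
        rw [hwv, List.flatten_cons, List.foldl_append]
      constructor
      · intro s hs h0
        obtain ⟨ha, hb⟩ := hpres1 s hs h0
        rw [hfold, hpres2 s hs ha, hb]
      · intro j hj u' hu'
        cases j with
        | zero =>
          simp only [hwv, List.getElem_cons_zero] at hu'
          obtain ⟨a, b, c, _⟩ := (hWI.hp) u' hu'
          refine ⟨a, ?_⟩
          obtain ⟨ha, hb⟩ := hpres1 (pvEff n' u') (pvEff_lt n' u' a) b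
          rw [hfold, hpres2 (pvEff n' u') (pvEff_lt n' u' a) ha, hb, c]
          simp
        | succ j =>
          simp only [hwv, List.getElem_cons_succ] at hu'
          simp only [hwv, List.length_cons, Nat.add_lt_add_iff_right] at hj
          obtain ⟨a, b⟩ := hlev j hj u' hu'
          refine ⟨a, ?_⟩
          rw [hfold, b]
          push_cast
          ring

-- ===== histogram =====

def pvBlocks : List Nat → Int → List Int
  | [], _ => []
  | c :: rest, base => List.replicate c base ++ pvBlocks rest (base + 1)

theorem pvFlattenKeys : ∀ (Wv : List (List Int)) (keyf : Int → Int) (base : Int),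
    (∀ j (hj : j < Wv.length), ∀ u ∈ Wv[j], keyf u = base + j) →
    Wv.flatten.map keyf = pvBlocks (Wv.map List.length) base := by
  intro Wv
  induction Wv with
  | nil => intro keyf base h; rfl
  | cons w0 rest ih =>
    intro keyf base h
    simp only [List.flatten_cons, List.map_append, List.map_cons, pvBlocks]
    congr 1
    · rw [List.eq_replicate_iff]
      refine ⟨by simp, ?_⟩
      intro b hb
      obtain ⟨u, hu, rfl⟩ := List.mem_map.mp hb
      have := h 0 (by simp) u (by simpa using hu)
      simpa using this
    · refine ih keyf (base + 1) ?_
      intro j hj u hu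
      have := h (j + 1) (by simpa using Nat.succ_lt_succ hj) u (by simpa using hu)
      rw [this]; push_cast; ring

theorem pvSetUpdateSelf : ∀ (c : Nat) (s : List Int) (b : Int), b ∈ s →
    PySem.Set.update s (List.replicate c b) = s := by
  intro c
  induction c with
  | zero => intro s b _; rfl
  | succ c ih =>
    intro s b hb
    rw [List.replicate_succ, PySem.Set.update_cons, PySem.Set.add_of_mem hb, ih s b hb]

theorem pvSetUpdateReplicate (c : Nat) (s : List Int) (b : Int) (hb : b ∉ s) (hc : c ≠ 0) :
    PySem.Set.update s (List.replicate c b) = s ++ [b] := by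
  cases c with
  | zero => exact absurd rfl hc
  | succ c =>
    rw [List.replicate_succ, PySem.Set.update_cons, PySem.Set.add_of_not_mem hb]
    exact pvSetUpdateSelf c (s ++ [b]) b (by simp)

theorem pvHistSum : ∀ (sizes : List Nat) (base : Int) (d : PySem.Dict Int Int),
    d.keys.Nodup → (∀ kk ∈ d.keys, kk < base) →
    ((((pvBlocks sizes base).foldl (fun d x => d.insert x (d.getD x 0 + 1)) d).values).map pvF).sum
      = (d.values.map pvF).sum + (sizes.map (fun c : Nat => pvF (Int.ofNat c))).sum := by
  intro sizes
  induction sizes with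
  | nil => intro base d _ _; simp [pvBlocks]
  | cons c rest ih =>
    intro base d hnd hbound
    simp only [pvBlocks, List.foldl_append, List.map_cons, List.sum_cons]
    by_cases hc : c = 0
    · subst hc
      simp only [List.replicate_zero, List.foldl_nil]
      rw [ih (base + 1) d hnd (fun kk hk => lt_trans (hbound kk hk) (by omega))]
      have : pvF (Int.ofNat 0) = 0 := by decide
      rw [this]; ring
    · have hnotmem : base ∉ d.keys := fun hmem => absurd (hbound base hmem) (by omega)
      have hkeys1 : ((List.replicate c base).foldl
            (fun d x => d.insert x (d.getD x 0 + 1)) d).keys = d.keys ++ [base] := by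
        rw [PySem.Dict.keys_foldl_insert]
        exact pvSetUpdateReplicate c d.keys base hnotmem hc
      have hnd1 : ((List.replicate c base).foldl
            (fun d x => d.insert x (d.getD x 0 + 1)) d).keys.Nodup := by
        rw [hkeys1]
        simp only [List.nodup_append, List.nodup_cons, List.nodup_nil, List.not_mem_nil,
          not_false_iff, and_true, true_and]
        refine ⟨hnd, ?_⟩
        intro a ha b hb
        rw [List.mem_singleton.mp hb]
        intro hh
        rw [hh] at ha
        exact hnotmem ha
      have hget1 : ∀ kk : Int, ((List.replicate c base).foldl
            (fun d x => d.insert x (d.getD x 0 + 1)) d).getD kk 0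
          = d.getD kk 0 + ((List.replicate c base).count kk : Int) :=
        fun kk => PySem.Dict.getD_foldl_insert_add_one (List.replicate c base) d kk
      have hval1 : ((List.replicate c base).foldl
            (fun d x => d.insert x (d.getD x 0 + 1)) d).values = d.values ++ [(c : Int)] := by
        rw [PySem.Dict.values_eq_map_keys _ hnd1 0, hkeys1, List.map_append]
        congr 1
        · rw [PySem.Dict.values_eq_map_keys d hnd 0]
          refine List.map_congr_left ?_
          intro kk hk
          rw [hget1 kk]
          have hne : kk ≠ base := fun hh => absurd (hbound kk hk) (by rw [hh]; omega)
          have : (List.replicate c base).count kk = 0 := by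
            rw [List.count_replicate]
            simp [Ne.symm hne]
          rw [this]; simp
        · simp only [List.map_cons, List.map_nil]
          rw [hget1 base]
          have hcf : d.contains base = false := by
            rw [PySem.Dict.contains_eq_decide_mem_keys]
            simp [hnotmem]
          have h0 : d.getD base 0 = 0 := PySem.Dict.getD_of_not_contains d 0 hcf
          rw [h0, List.count_replicate]
          simp
      rw [ih (base + 1) _ hnd1 (by
        rw [hkeys1]
        intro kk hk
        rcases List.mem_append.mp hk with h1 | h1
        · exact lt_trans (hbound kk h1) (by omega)
        · rw [List.mem_singleton.mp h1]; omega)]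
      rw [hval1]
      simp only [List.map_append, List.sum_append, List.map_cons, List.map_nil, List.sum_cons,
        List.sum_nil]
      rw [show Int.ofNat c = (c : Int) from rfl]
      ring

-- ===== build facts =====

def pvStep (st : List (List Int) × List Int) (r : List Int) : List (List Int) × List Int :=
  match r with
  | [u, v] => (pvModify st.1 (u - 1) (fun row => row ++ [v - 1]), pvModify st.2 (v - 1) (· + 1))
  | _ => st

theorem aBuild_eq (n' : Nat) (rs : List (List Int)) :
    aBuild n' rs = rs.foldl pvStep (List.replicate n' ([] : List Int), List.replicate n' (0 : Int)) := rfl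

theorem pvIncr (ind : List Int) (i : Int) :
    pvPossum (pvModify ind i (· + 1)) ≤ pvPossum ind + 1 := by
  unfold pvModify
  rcases hj : PySem.List.pyIdx? ind.length i with _ | j <;> dsimp only
  · omega
  · rcases hx : ind[j]? with _ | x <;> dsimp only
    · omega
    · obtain ⟨hjl, hval⟩ := List.getElem?_eq_some_iff.mp hx
      have := pvPossum_set ind j (x + 1) hjl
      rw [hval] at this
      omega

theorem pvRows {C : Int → Prop} (adj : List (List Int)) (i : Int) (w : Int)
    (h : ∀ row ∈ adj, ∀ v ∈ row, C v) (hw : C w) :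
    ∀ row ∈ pvModify adj i (fun row => row ++ [w]), ∀ v ∈ row, C v := by
  unfold pvModify
  rcases hj : PySem.List.pyIdx? adj.length i with _ | j <;> dsimp only
  · exact h
  · rcases hx : adj[j]? with _ | r <;> dsimp only
    · exact h
    · intro row hrow v hv
      rcases List.mem_or_eq_of_mem_set hrow with hmem | heq
      · exact h row hmem v hv
      · subst heq
        rcases List.mem_append.mp hv with hv' | hv'
        · exact h r (List.mem_of_getElem? hx) v hv'
        · rw [List.mem_singleton.mp hv']; exact hw

theorem pvBuildFacts (n' : Nat) : ∀ (rs : List (List Int)) (st : List (List Int) × List Int),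
    (rs.foldl pvStep st).1.length = st.1.length ∧
    (rs.foldl pvStep st).2.length = st.2.length ∧
    pvPossum (rs.foldl pvStep st).2 ≤ pvPossum st.2 + rs.length ∧
    ((∀ row ∈ st.1, ∀ v ∈ row, pvInR n' v) → (∀ u v : Int, [u, v] ∈ rs → pvInR n' (v - 1)) →
      ∀ row ∈ (rs.foldl pvStep st).1, ∀ v ∈ row, pvInR n' v) := by
  intro rs
  induction rs with
  | nil => intro st; exact ⟨rfl, rfl, by simp, fun h _ => h⟩
  | cons r rs ih =>
    intro st
    rcases r with _ | ⟨u, _ | ⟨v, _ | ⟨w, t⟩⟩⟩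
    · simp only [List.foldl_cons]
      obtain ⟨h1, h2, h3, h4⟩ := ih st
      exact ⟨h1, h2, by simpa using Nat.le_trans h3 (by omega),
        fun hr he => h4 hr (fun u v hm => he u v (List.mem_cons_of_mem _ hm))⟩
    · simp only [List.foldl_cons]
      obtain ⟨h1, h2, h3, h4⟩ := ih st
      exact ⟨h1, h2, by simpa using Nat.le_trans h3 (by omega),
        fun hr he => h4 hr (fun u v hm => he u v (List.mem_cons_of_mem _ hm))⟩
    · simp only [List.foldl_cons]
      obtain ⟨h1, h2, h3, h4⟩ := ih (pvStep st [u, v])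
      have hstep : pvStep st [u, v]
          = (pvModify st.1 (u - 1) (fun row => row ++ [v - 1]), pvModify st.2 (v - 1) (· + 1)) := rfl
      refine ⟨?_, ?_, ?_, ?_⟩
      · rw [h1, hstep]; exact pvModify_length _ _ _
      · rw [h2, hstep]; exact pvModify_length _ _ _
      · have := pvIncr st.2 (v - 1)
        rw [show (pvStep st [u, v]).2 = pvModify st.2 (v - 1) (· + 1) from rfl] at h3
        simp only [List.length_cons]
        omega
      · intro hr he
        refine h4 ?_ (fun u' v' hm => he u' v' (List.mem_cons_of_mem _ hm))
        rw [hstep]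
        exact pvRows st.1 (u - 1) (v - 1) hr (he u v (by simp))
    · simp only [List.foldl_cons]
      obtain ⟨h1, h2, h3, h4⟩ := ih st
      exact ⟨h1, h2, by simpa using Nat.le_trans h3 (by omega),
        fun hr he => h4 hr (fun u v hm => he u v (List.mem_cons_of_mem _ hm))⟩

theorem pvBuildRem (n' : Nat) : ∀ (rs : List (List Int)) (st : List (List Int) × List Int),
    st.1.length = n' → st.2.length = n' →
    (∀ r ∈ rs, ∃ u v : Int, r = [u, v] ∧ pvInR n' (u - 1) ∧ pvInR n' (v - 1)) →
    (∀ s, s < n' → st.2.getD s 0 = (pvRem n' st.1 [] s : Int)) →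
    ∀ s, s < n' → (rs.foldl pvStep st).2.getD s 0 = (pvRem n' (rs.foldl pvStep st).1 [] s : Int) := by
  intro rs
  induction rs with
  | nil => intro st _ _ _ h s hs; exact h s hs
  | cons r rs ih =>
    intro st hl1 hl2 hmem h s hs
    obtain ⟨u, v, rfl, hu, hv⟩ := hmem r (List.mem_cons_self ..)
    simp only [List.foldl_cons]
    have hstep : pvStep st [u, v]
        = (pvModify st.1 (u - 1) (fun row => row ++ [v - 1]), pvModify st.2 (v - 1) (· + 1)) := rfl
    refine ih (pvStep st [u, v]) (by rw [hstep]; exact (pvModify_length _ _ _).trans hl1)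
      (by rw [hstep]; exact (pvModify_length _ _ _).trans hl2)
      (fun r hr => hmem r (List.mem_cons_of_mem _ hr)) ?_ s hs
    intro s hs
    have huR : pvInR st.1.length (u - 1) := by rw [hl1]; exact hu
    have hvR : pvInR st.2.length (v - 1) := by rw [hl2]; exact hv
    have heffu : pvEff st.1.length (u - 1) = pvEff n' (u - 1) := by rw [hl1]
    have heffv : pvEff st.2.length (v - 1) = pvEff n' (v - 1) := by rw [hl2]
    rw [hstep]
    have hind : (pvModify st.2 (v - 1) (· + 1)).getD s 0
        = st.2.getD s 0 + (if s = pvEff n' (v - 1) then 1 else 0) := by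
      rw [pvModify_getD st.2 (v - 1) (· + 1) 0 hvR s, heffv]
      split <;> simp
    have hocc : ∀ t, pvOcc n' (pvModify st.1 (u - 1) (fun row => row ++ [v - 1])) t s
        = pvOcc n' st.1 t s
          + (if t = pvEff n' (u - 1) then (if pvEff n' (v - 1) = s then 1 else 0) else 0) := by
      intro t
      unfold pvOcc
      rw [pvModify_getD st.1 (u - 1) (fun row => row ++ [v - 1]) [] huR t, heffu]
      by_cases ht : t = pvEff n' (u - 1)
      · rw [if_pos ht, if_pos ht, List.countP_append]
        simp only [List.countP_cons, List.countP_nil]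
        by_cases hvs : pvEff n' (v - 1) = s
        · simp [hvs]
        · simp [hvs, beq_iff_eq]
      · rw [if_neg ht, if_neg ht]; omega
    have hrem : pvRem n' (pvModify st.1 (u - 1) (fun row => row ++ [v - 1])) [] s
        = pvRem n' st.1 [] s + (if pvEff n' (v - 1) = s then 1 else 0) := by
      unfold pvRem
      have hfil : (Finset.range n').filter (fun t => t ∉ ([] : List Nat)) = Finset.range n' := by
        ext t; simp
      rw [hfil]
      rw [Finset.sum_congr rfl (fun t _ => hocc t), Finset.sum_add_distrib]
      congr 1
      rw [Finset.sum_ite_eq' (Finset.range n') (pvEff n' (u - 1))]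
      rw [if_pos (Finset.mem_range.mpr (pvEff_lt n' (u - 1) (by rwa [hl1] at huR)))]
    rw [hind, hrem, h s hs]
    by_cases he : s = pvEff n' (v - 1)
    · rw [if_pos he, if_pos he.symm]; push_cast; ring
    · rw [if_neg he, if_neg (fun hh => he hh.symm)]; push_cast; ring

theorem pvGetD_mem_or {α : Type} (l : List α) (i : Int) (d : α) :
    PySem.List.pyGetD l i d ∈ l ∨ PySem.List.pyGetD l i d = d := by
  unfold PySem.List.pyGetD PySem.List.pyGet?
  rcases hj : PySem.List.pyIdx? l.length i with _ | j
  · right; rfl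
  · simp only [Option.bind_some]
    rcases hx : l[j]? with _ | x
    · right; rfl
    · left; simpa using List.mem_of_getElem? hx

theorem pvEff_natCast (len i : Nat) : pvEff len ((i : Nat) : Int) = i := by
  unfold pvEff
  rw [if_neg (by exact not_lt.mpr (Int.natCast_nonneg i))]
  simp

theorem pvGetD_one_zero (l : List Int) (i : Nat) (h : i < l.length) : l.getD i 1 = l.getD i 0 := by
  rw [List.getD_eq_getElem l 1 h, List.getD_eq_getElem l 0 h]

theorem minNumberOfSemesters_spec : Claim_equal_minNumberOfSemesters := by
  intro n relations k _hdom hpre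
  unfold Spec_minNumberOfSemesters
  simp only [minNumberOfSemesters, minNumberOfSemesters_alt]
  rw [show bBuild n.toNat relations = aBuild n.toNat relations from rfl]
  obtain ⟨hl1, hl2, hl3, hl4⟩ :=
    pvBuildFacts n.toNat relations (List.replicate n.toNat ([] : List Int), List.replicate n.toNat (0 : Int))
  rw [← aBuild_eq] at hl1 hl2 hl3 hl4
  have hslen : (aBuild n.toNat relations).1.length = n.toNat := by rw [hl1]; simp
  have hind : (aBuild n.toNat relations).2.length = n.toNat := by rw [hl2]; simp
  have hpos : pvPossum (aBuild n.toNat relations).2 ≤ relations.length := by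
    have hz : pvPossum (List.replicate n.toNat (0 : Int)) = 0 := by
      simp [pvPossum, List.map_replicate]
    rw [show (List.replicate n.toNat ([] : List Int), List.replicate n.toNat (0 : Int)).2
        = List.replicate n.toNat (0 : Int) from rfl] at hl3
    omega
  have hmem2 : ∀ r ∈ relations, ∃ u v : Int, r = [u, v] ∧ pvInR n.toNat (u - 1) ∧ pvInR n.toNat (v - 1) := by
    intro r hr
    obtain ⟨hlen2, hxs⟩ := hpre r hr
    rcases r with _ | ⟨u, _ | ⟨v, _ | ⟨x, t⟩⟩⟩ <;> simp at hlen2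
    have hu := hxs u (by simp)
    have hv := hxs v (by simp)
    refine ⟨u, v, rfl, ?_, ?_⟩ <;> unfold pvInR <;> constructor <;> omega
  have hrows : ∀ row ∈ (aBuild n.toNat relations).1, ∀ v ∈ row, pvInR n.toNat v := by
    refine hl4 ?_ ?_
    · intro row hrow v hv
      rw [List.eq_of_mem_replicate hrow] at hv
      simp at hv
    · intro u v hm
      obtain ⟨u', v', heq, _, hv'⟩ := hmem2 [u, v] hm
      obtain ⟨rfl, rfl⟩ : u = u' ∧ v = v' := by
        constructor <;> [injection heq; skip]
        injection heq with h1 h2; injection h2 with h3 _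
      exact hv'
  have Hadj : ∀ u : Int, ∀ v ∈ PySem.List.pyGetD (aBuild n.toNat relations).1 u [], pvInR n.toNat v := by
    intro u v hv
    rcases pvGetD_mem_or (aBuild n.toNat relations).1 u [] with hmem | hdef
    · exact hrows _ hmem v hv
    · rw [hdef] at hv; simp at hv
  have hdqlen :
      (((List.range n.toNat).map Int.ofNat).filter
        (fun i => PySem.List.pyGetD (aBuild n.toNat relations).2 i 1 == 0)).length ≤ n.toNat := by
    calc _ ≤ (((List.range n.toNat).map Int.ofNat)).length := List.length_filter_le _ _
      _ = n.toNat := by simp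
  -- flat Kahn order = concatenation of A's waves
  have horder := pvMaster1 (aBuild n.toNat relations).1 n.toNat Hadj
    (n.toNat + relations.length + 1) (n.toNat + relations.length + 1) (n.toNat + relations.length + 1)
    (((List.range n.toNat).map Int.ofNat).filter
      (fun i => PySem.List.pyGetD (aBuild n.toNat relations).2 i 1 == 0))
    (aBuild n.toNat relations).2 [] hind (by omega) le_rfl le_rfl
  rw [List.nil_append] at horder
  rw [horder]
  -- initial wave invariant
  have hq0mem : ∀ x ∈ ((List.range n.toNat).map Int.ofNat).filter
      (fun i => PySem.List.pyGetD (aBuild n.toNat relations).2 i 1 == 0),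
      ∃ i : Nat, i < n.toNat ∧ x = ((i : Nat) : Int) ∧
        (aBuild n.toNat relations).2.getD i 0 = 0 := by
    intro x hx
    obtain ⟨hx1, hx2⟩ := List.mem_filter.mp hx
    obtain ⟨i, hi, rfl⟩ := List.mem_map.mp hx1
    refine ⟨i, by simpa using hi, by simp, ?_⟩
    rw [show (Int.ofNat i) = ((i : Nat) : Int) from rfl, PySem.List.pyGetD_natCast] at hx2
    have := beq_iff_eq.mp hx2
    rw [pvGetD_one_zero _ i (by rw [hind]; simpa using hi)] at this
    exact this
  have hrem0 : ∀ s, s < n.toNat →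
      (aBuild n.toNat relations).2.getD s 0 = (pvRem n.toNat (aBuild n.toNat relations).1 [] s : Int) := by
    rw [aBuild_eq]
    refine pvBuildRem n.toNat relations _ (by simp) (by simp) hmem2 ?_
    intro s hs
    rw [List.getD_eq_getElem _ 0 (by simpa using hs)]
    simp only [List.getElem_replicate]
    unfold pvRem pvOcc
    have : ∀ t ∈ (Finset.range n.toNat).filter (fun t => t ∉ ([] : List Nat)),
        ((List.replicate n.toNat ([] : List Int)).getD t []).countP (fun v => pvEff n.toNat v == s) = 0 := by
      intro t ht
      rcases Nat.lt_or_ge t n.toNat with h | h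
      · rw [List.getD_eq_getElem _ [] (by simpa using h)]
        simp
      · rw [List.getD_eq_default _ [] (by simpa using h)]
        simp
    rw [Finset.sum_congr rfl this]
    simp
  have hWI0 : pvWI n.toNat (aBuild n.toNat relations).1 []
      (((List.range n.toNat).map Int.ofNat).filter
        (fun i => PySem.List.pyGetD (aBuild n.toNat relations).2 i 1 == 0))
      [] (aBuild n.toNat relations).2 (List.replicate n.toNat (0 : Int)) 0 := by
    refine ⟨hind, by simp, by simp, hrem0, ?_, ?_, by simp, List.nodup_nil, ?_⟩
    · intro v hv
      obtain ⟨i, hi, rfl, h0⟩ := hq0mem v hv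
      refine ⟨⟨by omega, by omega⟩, ?_, ?_, by simp⟩
      · rw [pvEff_natCast]; exact h0
      · rw [pvEff_natCast, List.getD_eq_getElem _ 0 (by simpa using hi)]
        simp
    · refine List.Nodup.map_on ?_ ?_
      · intro x hx y hy he
        obtain ⟨i, _, rfl, _⟩ := hq0mem x hx
        obtain ⟨j, _, rfl, _⟩ := hq0mem y hy
        rw [pvEff_natCast, pvEff_natCast] at he
        rw [he]
      · exact List.Nodup.filter _ (List.Nodup.map (fun a b h => Int.ofNat.inj h) (List.nodup_range))
    · intro sl hs _
      rw [List.getD_eq_getElem _ 0 (by simpa using hs)]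
      simp
  obtain ⟨_, hkey⟩ := pvMaster2 n.toNat (aBuild n.toNat relations).1 hslen hrows
    (n.toNat + relations.length + 1) []
    (((List.range n.toNat).map Int.ofNat).filter
      (fun i => PySem.List.pyGetD (aBuild n.toNat relations).2 i 1 == 0))
    (aBuild n.toNat relations).2 (List.replicate n.toNat (0 : Int)) 0 hWI0
  -- name the waves and the final level table
  set Wv := pvWaves (aBuild n.toNat relations).1 (n.toNat + relations.length + 1)
    (((List.range n.toNat).map Int.ofNat).filter
      (fun i => PySem.List.pyGetD (aBuild n.toNat relations).2 i 1 == 0))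
    (aBuild n.toNat relations).2 with hWv
  set Lf := Wv.flatten.foldl (bRelaxRow (aBuild n.toNat relations).1)
    (List.replicate n.toNat (0 : Int)) with hLf
  have hLflen : Lf.length = n.toNat := by
    rw [hLf, pvRelaxLen]; simp
  -- the keys read by the histogram
  have hkeys : ∀ j (hj : j < Wv.length), ∀ u ∈ Wv[j],
      PySem.List.pyGetD Lf u 0 = 0 + (j : Int) := by
    intro j hj u hu
    obtain ⟨ha, hb⟩ := hkey j hj u hu
    rw [pvGetD_eff Lf u 0 (by rw [hLflen]; exact ha)]
    rw [show pvEff Lf.length u = pvEff n.toNat u from by rw [hLflen]]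
    exact hb
  have hmapkeys : Wv.flatten.map (fun u => PySem.List.pyGetD Lf u 0)
      = pvBlocks (Wv.map List.length) 0 :=
    pvFlattenKeys Wv _ 0 hkeys
  -- histogram fold as an insert-increment fold over the key list
  have hhist : Wv.flatten.foldl (bHistStep Lf) PySem.Dict.empty
      = (Wv.flatten.map (fun u => PySem.List.pyGetD Lf u 0)).foldl
          (fun d x => d.insert x (d.getD x 0 + 1)) PySem.Dict.empty := by
    rw [List.foldl_map]
    rfl
  -- B's final sum
  rw [aLoop_waves]
  rw [show (fun (acc c : Int) => acc + (PySem.Int.floordiv c 2 + PySem.Int.mod c 2))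
      = (fun acc c => acc + pvF c) from rfl]
  rw [PySem.List.foldl_add]
  rw [hhist, hmapkeys]
  have hsum := pvHistSum (Wv.map List.length) 0 PySem.Dict.empty
    (by rw [PySem.Dict.keys_empty]; exact List.nodup_nil)
    (by rw [PySem.Dict.keys_empty]; intro kk hk; simp at hk)
  rw [hsum]
  have hv0 : (PySem.Dict.empty : PySem.Dict Int Int).values = [] := rfl
  rw [hv0]
  simp only [List.map_nil, List.sum_nil, List.map_map, zero_add]
  rfl
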